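-- pv_equiv track=rewrite | github.com/lonelywolf1981/ad_portal | app/main.py | _dn_first_component_value
-- ===== SOURCE A (Python) =====
-- def _dn_first_component_value(dn: str) -> str:
--     """Return first RDN value from a DN (e.g. CN=USB-Deny,OU=... -> USB-Deny)."""
--     s = (dn or "").strip()
--     if not s:
--         return ""
--
--     # Extract first RDN (handle escaped commas)
--     first = []
--     esc = False
--     for ch in s:
--         if esc:
--             first.append(ch)
--             esc = False
--             continue
--         if ch == "\\":
--             esc = True
--             continue
--         if ch == ",":
--             break
--         first.append(ch)
--     rdn = "".join(first).strip()
--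
--     if "=" in rdn:
--         _, val = rdn.split("=", 1)
--         val = val.strip()
--     else:
--         val = rdn
--
--     # Unescape common DN escapes
--     val = val.replace("\\,", ",").replace("\\+", "+").replace("\\=", "=").replace('\\"', '"')
--     return val.strip()
-- ===== SOURCE B (Python) =====
-- def _dn_first_component_value(dn: str) -> str:
--     """Return first RDN value from a DN (e.g. CN=USB-Deny,OU=... -> USB-Deny)."""
--     s = (dn or "").strip()
--
--     # The first RDN ends at the first comma that is not escaped: glue comma-split
--     # parts back together while the text so far ends in an odd run of backslashes.
--     parts = s.split(",")
--     first = parts[0]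
--     for part in parts[1:]:
--         if (len(first) - len(first.rstrip("\\"))) % 2 == 0:
--             break
--         first = first + "," + part
--
--     # Unescape: every backslash escapes the character after it.  Splitting on
--     # backslash, an empty middle piece marks an escaped backslash (two in a row).
--     pieces = first.split("\\")
--     out = [pieces[0]]
--     j = 1
--     while j < len(pieces):
--         if pieces[j] == "" and j + 1 < len(pieces):
--             out.append("\\" + pieces[j + 1])
--             j += 2
--         else:
--             out.append(pieces[j])
--             j += 1
--     rdn = "".join(out).strip()
--
--     # Value = everything after the first "=" (the whole RDN if there is none),
--     # with any still-escaped DN specials resolved.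
--     value = rdn.split("=", 1)[-1].strip()
--     for c in ',+="':
--         value = value.replace("\\" + c, c)
--     return value.strip()
-- ===== Notes on version B (the rewrite author's own statement) =====
-- stated objective: faster
-- what changed: Replaces A's per-character escape state machine with a split-based pipeline (comma-split with merge while the accumulated part ends in an odd backslash run, piece-wise unescape via a backslash split, value taken after the first equals sign), moving the scanning into C-level str.split/join.
import Mathlib
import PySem

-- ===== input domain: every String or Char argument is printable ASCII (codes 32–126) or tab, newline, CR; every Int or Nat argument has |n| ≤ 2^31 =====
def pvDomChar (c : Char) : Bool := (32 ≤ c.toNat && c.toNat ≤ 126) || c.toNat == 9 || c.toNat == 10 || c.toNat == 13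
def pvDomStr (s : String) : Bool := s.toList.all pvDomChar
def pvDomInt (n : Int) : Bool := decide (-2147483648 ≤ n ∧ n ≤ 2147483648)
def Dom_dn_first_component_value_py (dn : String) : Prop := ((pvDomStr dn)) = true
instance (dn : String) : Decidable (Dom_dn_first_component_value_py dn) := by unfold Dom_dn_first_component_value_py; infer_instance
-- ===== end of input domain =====

-- B replaces A's char-by-char escape state machine by a split-based pipeline (comma-split with
-- merge-on-trailing-backslash parity, backslash-split unescape); a timing run measured B faster.

-- ===== PORT A =====

-- the for-loop over s: esc flag, append, break at an unescaped comma (literal)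
def pvAFirst : List Char → Bool → List Char → List Char
  | [], _, first => first
  | ch :: rest, esc, first =>
    if esc then pvAFirst rest false (first ++ [ch])
    else if ch = '\\' then pvAFirst rest true first
    else if ch = ',' then first
    else pvAFirst rest false (first ++ [ch])

-- exact port of str.split("=", 1) (single-char separator, maxsplit 1), used by both Pythons;
-- hand-ported because PySem.Chars.splitOnMax is fuel-based; exact on all inputs
def pvSplitEq1 : List Char → List (List Char)
  | [] => [[]]
  | c :: r =>
    if c = '=' then [[], r]
    else match pvSplitEq1 r with
      | h :: t => (c :: h) :: t
      | [] => [[c]]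

def dn_first_component_value_py (dn : String) : String :=
  let s := PySem.Chars.strip dn.toList          -- (dn or "").strip(); 'or ""' is the identity on a str argument
  if s = [] then ""
  else
    let rdn := PySem.Chars.strip (pvAFirst s false [])
    let val :=
      if PySem.Chars.isIn ['='] rdn then
        match pvSplitEq1 rdn with               -- _, val = rdn.split("=", 1); val = val.strip()
        | [_, v] => PySem.Chars.strip v
        | _ => []                               -- unreachable: "=" in rdn gives exactly two parts
      else rdn
    let val := PySem.Chars.replace (PySem.Chars.replace (PySem.Chars.replace
        (PySem.Chars.replace val ['\\', ','] [',']) ['\\', '+'] ['+']) ['\\', '='] ['=']) ['\\', '"'] ['"']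
    String.ofList (PySem.Chars.strip val)

-- ===== PORT B =====

-- exact port of str.split(sep) for a single-char separator (PySem.Chars.splitOn computes the
-- same values but through a fuel-based loop); exact on all inputs
def pvSplit1 (sep : Char) : List Char → List (List Char)
  | [] => [[]]
  | c :: r =>
    if c = sep then [] :: pvSplit1 sep r
    else match pvSplit1 sep r with
      | h :: t => (c :: h) :: t
      | [] => [[c]]

-- exact port of s.rstrip("\\") (same shape as PySem.Chars.rstrip, with the one-char set)
def pvRstripBS (s : List Char) : List Char := (s.reverse.dropWhile (· == '\\')).reverse

-- the for-loop over parts[1:]: break when 'first' ends in an even run of backslashes, else merge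
def pvMergeLoop : List Char → List (List Char) → List Char
  | first, [] => first
  | first, part :: rest =>
    if PySem.Int.mod (PySem.Chars.len first - PySem.Chars.len (pvRstripBS first)) 2 == 0 then first
    else pvMergeLoop (first ++ ',' :: part) rest

-- exact port of str.split("=", 1) (B's own copy; hand-ported because PySem.Chars.splitOnMax is fuel-based)
def pvSplitEq1Alt : List Char → List (List Char)
  | [] => [[]]
  | c :: r =>
    if c = '=' then [[], r]
    else match pvSplitEq1Alt r with
      | h :: t => (c :: h) :: t
      | [] => [[c]]

-- the while-loop over pieces[1:]: empty piece + successor = escaped backslash (consumes two pieces)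
def pvUnescPieces : List (List Char) → List (List Char)
  | [] => []
  | [] :: p :: rest => ('\\' :: p) :: pvUnescPieces rest
  | [[]] => [[]]
  | (c :: p) :: rest => (c :: p) :: pvUnescPieces rest

def dn_first_component_value_py_alt (dn : String) : String :=
  let s := PySem.Chars.strip dn.toList
  let first :=
    match pvSplit1 ',' s with
    | p0 :: rest => pvMergeLoop p0 rest
    | [] => []                                  -- unreachable: split never returns an empty list
  let pieces := pvSplit1 '\\' first
  let rdn := PySem.Chars.strip (PySem.Chars.join []
    (match pieces with
     | p0 :: rest => p0 :: pvUnescPieces rest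
     | [] => []))                               -- unreachable
  let val := PySem.Chars.strip ((pvSplitEq1Alt rdn).getLastD [])   -- rdn.split("=", 1)[-1].strip()
  let val := [',', '+', '=', '"'].foldl (fun v c => PySem.Chars.replace v ['\\', c] [c]) val
  String.ofList (PySem.Chars.strip val)

-- ===== PRECONDITION & SPEC =====
def Spec_dn_first_component_value_py (dn : String) (out : String) : Prop := out = dn_first_component_value_py_alt dn
instance (dn : String) (out : String) : Decidable (Spec_dn_first_component_value_py dn out) := by unfold Spec_dn_first_component_value_py; infer_instance

-- ===== CLAIM (what is proved, stated in full; the proofs are below) =====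
def Claim_equal_dn_first_component_value_py : Prop := ∀ (dn : String), Dom_dn_first_component_value_py dn → Spec_dn_first_component_value_py dn (dn_first_component_value_py dn)

-- ===== LEMMAS AND PROOFS =====

-- A's loop, unaccumulated (escape-dropping scan that breaks at an unescaped comma)
def pvSc : List Char → Bool → List Char
  | [], _ => []
  | c :: r, true => c :: pvSc r false
  | c :: r, false => if c = '\\' then pvSc r true else if c = ',' then [] else c :: pvSc r false

-- raw prefix of s up to (excluding) the first unescaped comma
def pvRp : List Char → Bool → List Char
  | [], _ => []
  | c :: r, true => c :: pvRp r false
  | c :: r, false => if c = '\\' then c :: pvRp r true else if c = ',' then [] else c :: pvRp r false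

-- escape-dropping scan without the comma break
def pvCu : List Char → Bool → List Char
  | [], _ => []
  | c :: r, true => c :: pvCu r false
  | c :: r, false => if c = '\\' then pvCu r true else c :: pvCu r false

-- trailing backslash run length
def pvTb (u : List Char) : Nat := (u.reverse.takeWhile (· == '\\')).length

theorem pvAFirst_eq_sc : ∀ (s : List Char) (e : Bool) (acc : List Char),
    pvAFirst s e acc = acc ++ pvSc s e := by
  intro s
  induction s with
  | nil => intro e acc; cases e <;> simp [pvAFirst, pvSc]
  | cons c r ih =>
    intro e acc
    cases e with
    | true => simp [pvAFirst, pvSc, ih]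
    | false =>
      by_cases h1 : c = '\\'
      · simp [pvAFirst, pvSc, h1, ih]
      · by_cases h2 : c = ','
        · simp [pvAFirst, pvSc, h2]
        · simp [pvAFirst, pvSc, h1, h2, ih]

theorem pvSplit1_ne_nil (sep : Char) (s : List Char) : pvSplit1 sep s ≠ [] := by
  cases s with
  | nil => simp [pvSplit1]
  | cons c r =>
    simp only [pvSplit1]
    split_ifs
    · simp
    · cases h : pvSplit1 sep r <;> simp

theorem pvSplit1_no_sep (sep : Char) (s : List Char) (h : sep ∉ s) : pvSplit1 sep s = [s] := by
  induction s with
  | nil => rfl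
  | cons c r ih =>
    have hc : ¬ c = sep := fun hh => h (by simp [hh])
    have hr : sep ∉ r := fun hh => h (List.mem_cons_of_mem _ hh)
    simp [pvSplit1, hc, ih hr]

theorem pvSplit1_append (sep : Char) (u v : List Char) (hu : sep ∉ u) :
    pvSplit1 sep (u ++ sep :: v) = u :: pvSplit1 sep v := by
  induction u with
  | nil => simp [pvSplit1]
  | cons c u ih =>
    have hc : ¬ c = sep := fun h => hu (by simp [h])
    have hcu : sep ∉ u := fun h => hu (List.mem_cons_of_mem _ h)
    simp [pvSplit1, hc, ih hcu]

theorem pvTw_append_not {p : Char → Bool} (l : List Char) (c : Char) (m : List Char)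
    (hc : p c = false) : (l ++ c :: m).takeWhile p = l.takeWhile p := by
  induction l with
  | nil => simp [hc]
  | cons a l ih =>
    by_cases ha : p a = true
    · simp [ha, ih]
    · simp [ha]

theorem pvTw_append_all {p : Char → Bool} (l m : List Char) (h : l.all p) :
    (l ++ m).takeWhile p = l ++ m.takeWhile p := by
  induction l with
  | nil => rfl
  | cons a l ih =>
    simp only [List.all_cons, Bool.and_eq_true] at h
    simp [h.1, ih h.2]

theorem pvTw_append_not_all {p : Char → Bool} (l : List Char) (c : Char)
    (h : l.all p = false) : (l ++ [c]).takeWhile p = l.takeWhile p := by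
  induction l with
  | nil => simp at h
  | cons a l ih =>
    simp only [List.all_cons] at h
    by_cases ha : p a = true
    · have hl : l.all p = false := by simpa [ha] using h
      simp [ha, ih hl]
    · simp [ha]

theorem pvTb_append_comma (f h : List Char) : pvTb (f ++ ',' :: h) = pvTb h := by
  unfold pvTb
  have : (f ++ ',' :: h).reverse = h.reverse ++ ',' :: f.reverse := by simp
  rw [this, pvTw_append_not _ _ _ (by decide)]

theorem pvTb_cons_not (c : Char) (u : List Char) (hc : ¬ c = '\\') : pvTb (c :: u) = pvTb u := by
  unfold pvTb
  have h1 : (c :: u).reverse = u.reverse ++ c :: [] := by simp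
  rw [h1, pvTw_append_not _ _ _ (by simp [hc])]

theorem pvTb_cons_bs (u : List Char) :
    pvTb ('\\' :: u) = if u.all (· == '\\') then u.length + 1 else pvTb u := by
  unfold pvTb
  have h1 : ('\\' :: u).reverse = u.reverse ++ ['\\'] := by simp
  rw [h1]
  by_cases hall : u.all (· == '\\')
  · have hr : u.reverse.all (· == '\\') := by rw [List.all_reverse]; exact hall
    rw [pvTw_append_all _ _ hr]
    simp [hall]
  · have hall' : u.all (· == '\\') = false := Bool.eq_false_iff.mpr hall
    have hr : u.reverse.all (· == '\\') = false := by rw [List.all_reverse]; exact hall'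
    rw [pvTw_append_not_all _ _ hr]
    simp [hall']

theorem pvTb_all (u : List Char) (h : u.all (· == '\\')) : pvTb u = u.length := by
  unfold pvTb
  have hr : u.reverse.all (· == '\\') := by rw [List.all_reverse]; exact h
  have h2 := pvTw_append_all (p := (· == '\\')) u.reverse [] hr
  simp only [List.append_nil, List.takeWhile_nil] at h2
  rw [h2]
  simp

theorem pvCond_eq (f : List Char) :
    (PySem.Int.mod (PySem.Chars.len f - PySem.Chars.len (pvRstripBS f)) 2 == 0)
      = decide (pvTb f % 2 = 0) := by
  have h2 := List.takeWhile_append_dropWhile (p := (· == '\\')) (l := f.reverse)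
  have h3 : f.reverse.length
      = (f.reverse.takeWhile (· == '\\')).length + (f.reverse.dropWhile (· == '\\')).length := by
    conv_lhs => rw [← h2]
    simp only [List.length_append]
  have h1 : PySem.Chars.len f - PySem.Chars.len (pvRstripBS f) = ((pvTb f : Nat) : Int) := by
    simp only [PySem.Chars.len_eq, pvRstripBS, pvTb, List.length_reverse]
    simp only [List.length_reverse] at h3
    omega
  rw [h1]
  have h4 : PySem.Int.mod ((pvTb f : Nat) : Int) 2 = (((pvTb f % 2 : Nat)) : Int) := by
    exact_mod_cast PySem.Int.mod_natCast (pvTb f) 2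
  rw [h4]
  rcases Nat.mod_two_eq_zero_or_one (pvTb f) with h | h <;> simp [h]

theorem pvMergeLoop_extend : ∀ (t : List (List Char)) (f h : List Char),
    pvMergeLoop (f ++ ',' :: h) t = f ++ ',' :: pvMergeLoop h t := by
  intro t
  induction t with
  | nil => intro f h; rfl
  | cons u t ih =>
    intro f h
    simp only [pvMergeLoop, pvCond_eq, pvTb_append_comma]
    by_cases hp : pvTb h % 2 = 0
    · simp [hp]
    · have ha : (f ++ ',' :: h) ++ ',' :: u = f ++ ',' :: (h ++ ',' :: u) := by simp
      have hc : (decide (pvTb h % 2 = 0)) = false := by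
        simp only [decide_eq_false_iff_not]; exact hp
      simp only [hc, Bool.false_eq_true, if_false]
      rw [ha, ih]

theorem pvRp_no_comma (s : List Char) (h : ',' ∉ s) : ∀ e, pvRp s e = s := by
  induction s with
  | nil => intro e; cases e <;> rfl
  | cons c r ih =>
    have hc : ¬ c = ',' := fun hh => h (by simp [hh])
    have hr : ',' ∉ r := fun hh => h (List.mem_cons_of_mem _ hh)
    intro e
    cases e with
    | true => simp [pvRp, ih hr]
    | false =>
      by_cases hb : c = '\\'
      · simp [pvRp, hb, ih hr]
      · simp [pvRp, hb, hc, ih hr]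

theorem pvRp_split (v : List Char) : ∀ (u : List Char), ',' ∉ u →
    (pvRp (u ++ ',' :: v) false = if pvTb u % 2 = 1 then u ++ ',' :: pvRp v false else u)
    ∧ (pvRp (u ++ ',' :: v) true =
        if (if u.all (· == '\\') then u.length % 2 = 0 else pvTb u % 2 = 1)
        then u ++ ',' :: pvRp v false else u) := by
  intro u
  induction u with
  | nil =>
    intro _
    constructor
    · simp [pvTb, pvRp]
    · simp [pvRp]
  | cons c u ih =>
    intro hc
    have hcc : ¬ c = ',' := fun h => hc (by simp [h])
    have hcu : ',' ∉ u := fun h => hc (List.mem_cons_of_mem _ h)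
    obtain ⟨ih1, ih2⟩ := ih hcu
    constructor
    · by_cases hb : c = '\\'
      · subst hb
        have hstep : pvRp (('\\' :: u) ++ ',' :: v) false = '\\' :: pvRp (u ++ ',' :: v) true := by
          simp [pvRp]
        rw [hstep, ih2, pvTb_cons_bs]
        by_cases hall : u.all (· == '\\')
        · by_cases hpar : u.length % 2 = 0
          · have h1 : (u.length + 1) % 2 = 1 := by omega
            simp [hall, hpar, h1]
          · have h1 : ¬ (u.length + 1) % 2 = 1 := by omega
            simp [hall, hpar, h1]
        · have hall' : u.all (· == '\\') = false := Bool.eq_false_iff.mpr hall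
          rw [hall']
          simp only [Bool.false_eq_true, if_false]
          by_cases hpar : pvTb u % 2 = 1 <;> simp [hpar]
      · have hstep : pvRp ((c :: u) ++ ',' :: v) false = c :: pvRp (u ++ ',' :: v) false := by
          simp [pvRp, hb, hcc]
        rw [hstep, ih1, pvTb_cons_not c u hb]
        by_cases hpar : pvTb u % 2 = 1 <;> simp [hpar]
    · have hstep : pvRp ((c :: u) ++ ',' :: v) true = c :: pvRp (u ++ ',' :: v) false := by
        simp [pvRp]
      rw [hstep, ih1]
      by_cases hb : c = '\\'
      · subst hb
        by_cases hall : u.all (· == '\\')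
        · have htb : pvTb u = u.length := pvTb_all u hall
          have hall2 : ((('\\' : Char) :: u).all (· == '\\')) = true := by simp [hall]
          rw [hall2]
          by_cases hpar : u.length % 2 = 1
          · have h1 : (u.length + 1) % 2 = 0 := by omega
            simp [htb, hpar, h1]
          · have h1 : ¬ (u.length + 1) % 2 = 0 := by omega
            simp [htb, hpar, h1]
        · have hall' : u.all (· == '\\') = false := Bool.eq_false_iff.mpr hall
          have hall2 : ((('\\' : Char) :: u).all (· == '\\')) = false := by
            simp only [List.all_cons, hall', Bool.and_false]
          have htb : pvTb ('\\' :: u) = pvTb u := by rw [pvTb_cons_bs, hall']; simp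
          rw [hall2]
          simp only [Bool.false_eq_true, if_false]
          rw [htb]
          by_cases hpar : pvTb u % 2 = 1 <;> simp [hpar]
      · have hall2 : (((c : Char) :: u).all (· == '\\')) = false := by
          simp only [List.all_cons, Bool.and_eq_false_iff]
          left
          simp [hb]
        rw [hall2]
        simp only [Bool.false_eq_true, if_false]
        rw [pvTb_cons_not c u hb]
        by_cases hpar : pvTb u % 2 = 1 <;> simp [hpar]

theorem pvMem_split_first (s : List Char) (h : ',' ∈ s) :
    ∃ u v, s = u ++ ',' :: v ∧ ',' ∉ u := by
  induction s with
  | nil => simp at h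
  | cons c r ih =>
    by_cases hc : c = ','
    · exact ⟨[], r, by simp [hc], by simp⟩
    · have hr : ',' ∈ r := by
        rcases List.mem_cons.1 h with h' | h'
        · exact absurd h'.symm hc
        · exact h'
      obtain ⟨u, v, huv, hu⟩ := ih hr
      refine ⟨c :: u, v, by simp [huv], ?_⟩
      intro hmem
      rcases List.mem_cons.1 hmem with h' | h'
      · exact hc h'.symm
      · exact hu h'

theorem pvMerge_eq_rp : ∀ (s : List Char),
    (match pvSplit1 ',' s with
     | p0 :: rest => pvMergeLoop p0 rest
     | [] => []) = pvRp s false := by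
  have aux : ∀ (n : Nat) (s : List Char), s.length ≤ n →
      (match pvSplit1 ',' s with
       | p0 :: rest => pvMergeLoop p0 rest
       | [] => []) = pvRp s false := by
    intro n
    induction n with
    | zero =>
      intro s hlen
      have : s = [] := List.eq_nil_of_length_eq_zero (by omega)
      subst this
      rfl
    | succ n ih =>
      intro s hlen
      by_cases hm : ',' ∈ s
      · obtain ⟨u, v, rfl, hu⟩ := pvMem_split_first s hm
        rw [pvSplit1_append ',' u v hu]
        rcases hPv : pvSplit1 ',' v with _ | ⟨h0, t⟩
        · exact absurd hPv (pvSplit1_ne_nil ',' v)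
        · have hvlen : v.length ≤ n := by
            simp [List.length_append] at hlen
            omega
          have hIH := ih v hvlen
          rw [hPv] at hIH
          have hIH' : pvMergeLoop h0 t = pvRp v false := hIH
          show pvMergeLoop u (h0 :: t) = pvRp (u ++ ',' :: v) false
          rw [(pvRp_split v u hu).1]
          by_cases hp : pvTb u % 2 = 1
          · rw [if_pos hp]
            have hc : (PySem.Int.mod (PySem.Chars.len u - PySem.Chars.len (pvRstripBS u)) 2 == 0)
                = false := by
              rw [pvCond_eq]; simp only [decide_eq_false_iff_not]; omega
            simp only [pvMergeLoop, hc, Bool.false_eq_true, if_false]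
            rw [pvMergeLoop_extend, hIH']
          · rw [if_neg hp]
            have hc : (PySem.Int.mod (PySem.Chars.len u - PySem.Chars.len (pvRstripBS u)) 2 == 0)
                = true := by
              rw [pvCond_eq]; simp only [decide_eq_true_eq]; omega
            simp only [pvMergeLoop, hc, if_true]
      · rw [pvSplit1_no_sep ',' s hm]
        show pvMergeLoop s [] = pvRp s false
        rw [pvRp_no_comma s hm false]
        rfl
  exact fun s => aux s.length s le_rfl

theorem pvJoin_nil_flatten (l : List (List Char)) : PySem.Chars.join [] l = l.flatten := by
  induction l with
  | nil => rfl
  | cons x t ih =>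
    cases t with
    | nil => simp [PySem.Chars.join, List.intercalate, List.intersperse]
    | cons y t' =>
      simp only [PySem.Chars.join, List.intercalate] at ih ⊢
      simp [List.intersperse] at ih ⊢
      exact ih

-- piece-wise unescaping of the backslash split = the escape-dropping scan
theorem pvUnesc_eq_cu : ∀ (r : List Char),
    ((match pvSplit1 '\\' r with
      | p0 :: rest => p0 ++ (pvUnescPieces rest).flatten
      | [] => []) = pvCu r false)
    ∧ (pvUnescPieces (pvSplit1 '\\' r)).flatten = pvCu r true := by
  intro r
  induction r with
  | nil => constructor <;> rfl
  | cons c r ih =>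
    obtain ⟨ih1, ih2⟩ := ih
    rcases hq : pvSplit1 '\\' r with _ | ⟨h0, t⟩
    · exact absurd hq (pvSplit1_ne_nil '\\' r)
    rw [hq] at ih1 ih2
    have ih1' : h0 ++ (pvUnescPieces t).flatten = pvCu r false := ih1
    by_cases hb : c = '\\'
    · subst hb
      have hsp : pvSplit1 '\\' ('\\' :: r) = [] :: h0 :: t := by simp [pvSplit1, hq]
      constructor
      · rw [hsp]
        show [] ++ (pvUnescPieces (h0 :: t)).flatten = pvCu ('\\' :: r) false
        simp only [List.nil_append]
        rw [ih2]
        simp [pvCu]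
      · rw [hsp]
        have hund : pvUnescPieces ([] :: h0 :: t) = ('\\' :: h0) :: pvUnescPieces t := rfl
        rw [hund]
        show ('\\' :: h0) ++ (pvUnescPieces t).flatten = pvCu ('\\' :: r) true
        simp only [List.cons_append]
        rw [ih1']
        simp [pvCu]
    · have hsp : pvSplit1 '\\' (c :: r) = (c :: h0) :: t := by simp [pvSplit1, hb, hq]
      constructor
      · rw [hsp]
        show (c :: h0) ++ (pvUnescPieces t).flatten = pvCu (c :: r) false
        simp only [List.cons_append]
        rw [ih1']
        simp [pvCu, hb]
      · rw [hsp]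
        have hund : pvUnescPieces ((c :: h0) :: t) = (c :: h0) :: pvUnescPieces t := rfl
        rw [hund]
        show ((c :: h0) :: pvUnescPieces t).flatten = pvCu (c :: r) true
        simp only [List.flatten_cons, List.cons_append]
        rw [ih1']
        simp [pvCu]

theorem pvCu_rp : ∀ (s : List Char),
    pvCu (pvRp s false) false = pvSc s false ∧ pvCu (pvRp s true) true = pvSc s true := by
  intro s
  induction s with
  | nil => constructor <;> rfl
  | cons c r ih =>
    obtain ⟨ih1, ih2⟩ := ih
    constructor
    · by_cases hb : c = '\\'
      · simp [pvRp, pvCu, pvSc, hb, ih2]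
      · by_cases hc : c = ','
        · simp [pvRp, pvCu, pvSc, hc]
        · simp [pvRp, pvCu, pvSc, hb, hc, ih1]
    · simp [pvRp, pvCu, pvSc, ih1]

-- B's first-RDN pipeline equals A's scan
theorem pvFirst_eq (s : List Char) :
    PySem.Chars.join []
      (match pvSplit1 '\\'
          (match pvSplit1 ',' s with
           | p0 :: rest => pvMergeLoop p0 rest
           | [] => []) with
       | p0 :: rest => p0 :: pvUnescPieces rest
       | [] => []) = pvAFirst s false [] := by
  rw [pvMerge_eq_rp s]
  rcases hq : pvSplit1 '\\' (pvRp s false) with _ | ⟨p0, rest⟩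
  · exact absurd hq (pvSplit1_ne_nil _ _)
  · have h1 := (pvUnesc_eq_cu (pvRp s false)).1
    rw [hq] at h1
    rw [pvJoin_nil_flatten]
    show (p0 :: pvUnescPieces rest).flatten = pvAFirst s false []
    rw [pvAFirst_eq_sc s false []]
    simp only [List.nil_append]
    rw [← (pvCu_rp s).1, ← h1]
    simp

theorem pvSplitEq1Alt_eq (l : List Char) : pvSplitEq1Alt l = pvSplitEq1 l := by
  induction l with
  | nil => rfl
  | cons c r ih => simp only [pvSplitEq1Alt, pvSplitEq1, ih]

theorem pvSplitEq1_pair (l : List Char) (h : '=' ∈ l) : ∃ b a, pvSplitEq1 l = [b, a] := by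
  induction l with
  | nil => simp at h
  | cons c r ih =>
    by_cases hc : c = '='
    · exact ⟨[], r, by simp [pvSplitEq1, hc]⟩
    · have hr : '=' ∈ r := by
        rcases List.mem_cons.1 h with h' | h'
        · exact absurd h'.symm hc
        · exact h'
      obtain ⟨b, a, hba⟩ := ih hr
      exact ⟨c :: b, a, by simp [pvSplitEq1, hc, hba]⟩

theorem pvSplitEq1_no_eq (l : List Char) (h : '=' ∉ l) : pvSplitEq1 l = [l] := by
  induction l with
  | nil => rfl
  | cons c r ih =>
    have hc : ¬ c = '=' := fun hh => h (by simp [hh])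
    have hr : '=' ∉ r := fun hh => h (List.mem_cons_of_mem _ hh)
    simp [pvSplitEq1, hc, ih hr]

theorem pvIsIn_eq_mem (l : List Char) : PySem.Chars.isIn ['='] l = true ↔ '=' ∈ l := by
  rw [PySem.Chars.isIn_iff_infix]
  constructor
  · intro h
    exact h.subset (by simp)
  · intro h
    obtain ⟨u, t, rfl⟩ := List.append_of_mem h
    exact ⟨u, t, by simp⟩

theorem pvDropWhile_idem {α : Type} (p : α → Bool) (l : List α) :
    (l.dropWhile p).dropWhile p = l.dropWhile p := by
  rw [List.dropWhile_eq_self_iff]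
  intro hl
  exact List.dropWhile_get_zero_not p l (by simpa using hl)

theorem pvRstrip_idem (l : List Char) :
    PySem.Chars.rstrip (PySem.Chars.rstrip l) = PySem.Chars.rstrip l := by
  simp only [PySem.Chars.rstrip, List.reverse_reverse]
  rw [pvDropWhile_idem]

theorem pvLstrip_of_dropWhile_eq (l : List Char) (h : l.dropWhile PySem.Chars.isspace = l) :
    PySem.Chars.lstrip (PySem.Chars.rstrip l) = PySem.Chars.rstrip l := by
  simp only [PySem.Chars.lstrip, PySem.Chars.rstrip]
  rw [List.dropWhile_eq_self_iff]
  intro hl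
  have hsuf : (l.reverse.dropWhile PySem.Chars.isspace).reverse <+: l := by
    have h2 := (List.dropWhile_suffix (l := l.reverse) PySem.Chars.isspace).reverse
    simpa using h2
  obtain ⟨t, ht⟩ := hsuf
  have hl0 : 0 < l.length := by
    rw [← ht]; exact lt_of_lt_of_le hl (by simp)
  have hrt : 0 < ((l.reverse.dropWhile PySem.Chars.isspace).reverse ++ t).length := by
    rw [ht]; exact hl0
  have e1 : ((l.reverse.dropWhile PySem.Chars.isspace).reverse ++ t)[0]'hrt
      = ((l.reverse.dropWhile PySem.Chars.isspace).reverse)[0]'hl :=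
    List.getElem_append_left _
  have e2 : ((l.reverse.dropWhile PySem.Chars.isspace).reverse ++ t)[0]'hrt = l[0]'hl0 :=
    List.getElem_of_eq ht _
  rw [e1.symm.trans e2]
  exact List.dropWhile_eq_self_iff.mp h hl0

theorem pvStrip_idem (l : List Char) :
    PySem.Chars.strip (PySem.Chars.strip l) = PySem.Chars.strip l := by
  simp only [PySem.Chars.strip]
  rw [pvLstrip_of_dropWhile_eq _ (by simp [PySem.Chars.lstrip, pvDropWhile_idem]),
    pvRstrip_idem]

-- ===== VERDICT (by name: the statement is the Claim_ definition above) =====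
theorem dn_first_component_value_py_spec : Claim_equal_dn_first_component_value_py := by
  intro dn _
  show dn_first_component_value_py dn = dn_first_component_value_py_alt dn
  by_cases h0 : PySem.Chars.strip dn.toList = []
  · simp only [dn_first_component_value_py, dn_first_component_value_py_alt, h0]
    rfl
  · simp only [dn_first_component_value_py, dn_first_component_value_py_alt]
    rw [if_neg h0]
    rw [pvFirst_eq (PySem.Chars.strip dn.toList)]
    simp only [List.foldl]
    by_cases hin : PySem.Chars.isIn ['='] (PySem.Chars.strip (pvAFirst (PySem.Chars.strip dn.toList) false [])) = true
    · have hm := (pvIsIn_eq_mem _).1 hin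
      obtain ⟨b, a, hba⟩ := pvSplitEq1_pair _ hm
      rw [if_pos hin, pvSplitEq1Alt_eq, hba]
      rfl
    · have hm : '=' ∉ PySem.Chars.strip (pvAFirst (PySem.Chars.strip dn.toList) false []) := by
        intro hmem
        exact hin ((pvIsIn_eq_mem _).2 hmem)
      have hg : ∀ (x : List Char), [x].getLastD ([] : List Char) = x := fun x => rfl
      rw [if_neg hin, pvSplitEq1Alt_eq, pvSplitEq1_no_eq _ hm, hg, pvStrip_idem]
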